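-- pv_equiv track=rewrite | github.com/MrChepe09/Competitive-Programming-Codes | CodeForces Practice/Two_Teams_Composing.py | teamcomp
-- ===== SOURCE A (Python) =====
-- def teamcomp(n, a):
--   if(n==1):
--     return 0
--   fre = {}
--   same = 0
--   unique = 0
--   for i in a:
--     if(i in fre):
--       fre[i] += 1
--       same = max(same, fre[i])
--     else:
--       fre[i] = 1
--       unique += 1
--       same = max(same, fre[i])
--   if(same==unique-1):
--     return same
--   else:
--     val1 = min(same, unique-1)
--     val2 = min(same-1, unique)
--     return max(val1, val2)
-- ===== SOURCE B (Python) =====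
-- def teamcomp(n, a):
--     if n == 1:
--         return 0
--     s = sorted(a)
--     same = 0
--     unique = 0
--     run = 0
--     prev = None
--     for x in s:
--         if run > 0 and x == prev:
--             run += 1
--         else:
--             run = 1
--             unique += 1
--         prev = x
--         if run > same:
--             same = run
--     if same == unique - 1:
--         return same
--     return max(min(same, unique - 1), min(same - 1, unique))
-- ===== Notes on version B (the rewrite author's own statement) =====
-- stated objective: alternative
-- what changed: Replaced the hash-map frequency loop by sort-then-scan: sort a copy of a and make one linear pass over it maintaining a current-run length, a best-run length (same) and a new-run counter (unique), then apply the same final formula.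
import Mathlib
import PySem

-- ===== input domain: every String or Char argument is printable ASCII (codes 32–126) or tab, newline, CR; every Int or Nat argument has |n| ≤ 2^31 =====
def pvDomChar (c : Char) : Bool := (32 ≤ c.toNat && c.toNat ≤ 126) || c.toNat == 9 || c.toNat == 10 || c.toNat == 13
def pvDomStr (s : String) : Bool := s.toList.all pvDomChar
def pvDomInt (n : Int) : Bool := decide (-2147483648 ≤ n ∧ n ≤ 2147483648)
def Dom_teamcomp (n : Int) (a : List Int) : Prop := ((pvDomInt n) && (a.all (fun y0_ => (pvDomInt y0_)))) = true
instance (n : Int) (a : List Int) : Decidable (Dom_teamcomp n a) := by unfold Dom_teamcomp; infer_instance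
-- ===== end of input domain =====

-- B replaces A's hash-map frequency loop by sort-then-scan: sort a copy and make one
-- linear pass tracking the current run, the best run (same) and new runs (unique);
-- same final formula (objective: alternative, not faster).

-- ===== PORT A =====
-- one loop step of A's 'for i in a' body over the state (fre, same, unique)
def teamcompStep (st : PySem.Dict Int Int × Int × Int) (i : Int) :
    PySem.Dict Int Int × Int × Int :=
  let (fre, same, unique) := st
  if fre.contains i then
    let fre' := fre.insert i (fre.getD i 0 + 1)     -- fre[i] += 1
    (fre', max same (fre'.getD i 0), unique)        -- same = max(same, fre[i])
  else
    let fre' := fre.insert i 1                      -- fre[i] = 1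
    (fre', max same (fre'.getD i 0), unique + 1)    -- unique += 1; same = max(same, fre[i])

def teamcomp (n : Int) (a : List Int) : Int :=
  if n == 1 then 0
  else
    let st := a.foldl teamcompStep (PySem.Dict.empty, 0, 0)
    let same := st.2.1
    let unique := st.2.2
    if same == unique - 1 then same
    else
      let val1 := min same (unique - 1)
      let val2 := min (same - 1) unique
      max val1 val2

-- ===== PORT B =====
-- one step of B's 'for x in s' scan over the state (prev, run, same, unique)
def scanStep (st : Option Int × Int × Int × Int) (x : Int) :
    Option Int × Int × Int × Int :=
  let (prev, run, same, unique) := st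
  let (run', unique') :=
    if run > 0 && prev == some x then (run + 1, unique)   -- run += 1
    else (1, unique + 1)                                  -- run = 1; unique += 1
  let same' := if run' > same then run' else same         -- if run > same: same = run
  (some x, run', same', unique')                          -- prev = x

def teamcomp_alt (n : Int) (a : List Int) : Int :=
  if n == 1 then 0
  else
    let s := PySem.List.sorted a (fun x => x) false        -- s = sorted(a)
    let st := s.foldl scanStep (none, 0, 0, 0)
    let same := st.2.2.1
    let unique := st.2.2.2
    if same == unique - 1 then same
    else max (min same (unique - 1)) (min (same - 1) unique)

-- ===== PRECONDITION & SPEC =====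
def Spec_teamcomp (n : Int) (a : List Int) (out : Int) : Prop := out = teamcomp_alt n a
instance (n : Int) (a : List Int) (out : Int) : Decidable (Spec_teamcomp n a out) := by unfold Spec_teamcomp; infer_instance

-- ===== CLAIM (what is proved, stated in full; the proofs are below) =====
def Claim_equal_teamcomp : Prop := ∀ (n : Int) (a : List Int), Dom_teamcomp n a → Spec_teamcomp n a (teamcomp n a)

-- ===== LEMMAS AND PROOFS =====

-- max of per-distinct-element counts (0 on []): the 'same' both programs compute
def supCount (l : List Int) : Int :=
  ((PySem.Set.ofList l).map (fun x => (l.count x : Int))).foldl max 0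

theorem foldl_max_init (xs : List Int) (d : Int) : d ≤ xs.foldl max d := by
  induction xs generalizing d with
  | nil => simp
  | cons x t ih => exact le_trans (le_max_left d x) (ih (max d x))

theorem foldl_max_mem {xs : List Int} {y : Int} (d : Int) (h : y ∈ xs) :
    y ≤ xs.foldl max d := by
  induction xs generalizing d with
  | nil => simp_all
  | cons x t ih =>
    simp only [List.foldl_cons]
    rcases List.mem_cons.mp h with h | h
    · exact le_trans (h ▸ le_max_right d x) (foldl_max_init t (max d x))
    · exact ih (max d x) h

theorem foldl_max_le {xs : List Int} {d m : Int} (hd : d ≤ m)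
    (h : ∀ y ∈ xs, y ≤ m) : xs.foldl max d ≤ m := by
  induction xs generalizing d with
  | nil => simpa
  | cons x t ih =>
    simp only [List.foldl_cons]
    exact ih (max_le hd (h x List.mem_cons_self)) (fun y hy => h y (List.mem_cons_of_mem _ hy))

theorem count_append_singleton_int (l : List Int) (x y : Int) :
    (((l ++ [x]).count y : Int)) = (l.count y : Int) + (if y = x then 1 else 0) := by
  by_cases h : y = x
  · simp [List.count_append, h]
  · simp [List.count_append, h, List.count_eq_zero.mpr (by simp [h] : y ∉ [x])]

theorem supCount_append (l : List Int) (x : Int) :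
    supCount (l ++ [x]) = max (supCount l) ((l.count x : Int) + 1) := by
  have hx1 : (0 : Int) ≤ (l.count x : Int) + 1 := by positivity
  apply le_antisymm
  · apply foldl_max_le (le_max_of_le_right hx1)
    intro v hv
    obtain ⟨y, hy, rfl⟩ := List.mem_map.mp hv
    have hy' : y ∈ l ++ [x] := (PySem.Set.mem_ofList _ _).mp hy
    by_cases hyx : y = x
    · subst hyx
      rw [count_append_singleton_int, if_pos rfl]
      exact le_max_of_le_right (by omega)
    · have hyl : y ∈ l := by
        rcases List.mem_append.mp hy' with h | h
        · exact h
        · simp at h; omega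
      rw [count_append_singleton_int, if_neg hyx, add_zero]
      refine le_max_of_le_left ?_
      exact foldl_max_mem 0 (List.mem_map.mpr ⟨y, (PySem.Set.mem_ofList _ _).mpr hyl, rfl⟩)
  · apply max_le
    · apply foldl_max_le (foldl_max_init _ 0)
      intro v hv
      obtain ⟨y, hy, rfl⟩ := List.mem_map.mp hv
      have hy2 : y ∈ PySem.Set.ofList (l ++ [x]) :=
        (PySem.Set.mem_ofList _ _).mpr (List.mem_append.mpr (Or.inl ((PySem.Set.mem_ofList _ _).mp hy)))
      have hle : (l.count y : Int) ≤ ((l ++ [x]).count y : Int) := by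
        rw [count_append_singleton_int]; split <;> omega
      exact le_trans hle (foldl_max_mem 0 (List.mem_map.mpr ⟨y, hy2, rfl⟩))
    · have hx2 : x ∈ PySem.Set.ofList (l ++ [x]) :=
        (PySem.Set.mem_ofList _ _).mpr (List.mem_append.mpr (Or.inr (by simp)))
      have : ((l ++ [x]).count x : Int) = (l.count x : Int) + 1 := by
        rw [count_append_singleton_int, if_pos rfl]
      exact this ▸ foldl_max_mem 0 (List.mem_map.mpr ⟨x, hx2, rfl⟩)

theorem counter_append_insert (l : List Int) (x : Int) :
    PySem.Dict.counter (l ++ [x]) =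
      (PySem.Dict.counter l).insert x ((PySem.Dict.counter l).getD x 0 + 1) := by
  rw [← PySem.Dict.foldl_insert_getD_add_one_eq_counter,
      ← PySem.Dict.foldl_insert_getD_add_one_eq_counter, List.foldl_append]
  simp

theorem teamcomp_inv (p : List Int) :
    p.foldl teamcompStep (PySem.Dict.empty, 0, 0) =
      (PySem.Dict.counter p, supCount p, ((PySem.Set.ofList p).length : Int)) := by
  induction p using List.reverseRecOn with
  | nil => rfl
  | append_singleton l x ih =>
    rw [List.foldl_append, ih]
    simp only [List.foldl_cons, List.foldl_nil]
    dsimp only [teamcompStep]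
    rw [PySem.Dict.contains_counter, PySem.Set.ofList_append_singleton,
        supCount_append, counter_append_insert]
    by_cases hx : x ∈ l
    · rw [if_pos (List.contains_iff_mem.mpr hx)]
      have hadd : (PySem.Set.ofList l).add x = PySem.Set.ofList l := by
        simp [PySem.Set.add, PySem.Set.contains_eq_listContains,
          PySem.Set.mem_ofList, hx]
      rw [hadd]
      simp [PySem.Dict.getD_insert_self, PySem.Dict.getD_counter]
    · rw [if_neg (by simp [hx])]
      have hg0 : (PySem.Dict.counter l).getD x 0 = 0 := by
        rw [PySem.Dict.getD_counter]
        simp [List.count_eq_zero_of_not_mem hx]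
      have hadd : (PySem.Set.ofList l).add x = PySem.Set.ofList l ++ [x] := by
        simp only [PySem.Set.add]
        rw [if_neg]
        intro h
        rw [PySem.Set.contains_eq_listContains, List.contains_iff_mem, PySem.Set.mem_ofList] at h
        exact hx h
      rw [hadd, hg0]
      simp [PySem.Dict.getD_insert_self, List.count_eq_zero_of_not_mem hx]

-- in a ≤-sorted list every element is at most the last one
theorem le_getLast?_of_pairwise {l : List Int} (h : l.Pairwise (· ≤ ·)) {z y : Int}
    (hz : z ∈ l) (hy : l.getLast? = some y) : z ≤ y := by
  induction l with
  | nil => simp_all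
  | cons a t ih =>
    cases t with
    | nil =>
      simp at hz hy; omega
    | cons b u =>
      rw [List.getLast?_cons_cons] at hy
      rcases List.mem_cons.mp hz with rfl | hz'
      · have hby : b ∈ b :: u := List.mem_cons_self
        have hmem : y ∈ b :: u := by
          have := List.mem_of_getLast? (l := b :: u) hy
          exact this
        exact (List.pairwise_cons.mp h).1 y hmem
      · exact ih (List.pairwise_cons.mp h).2 hz' hy

theorem ite_gt_eq_max (a b : Int) : (if b > a then b else a) = max a b := by
  rcases le_total a b with h | h
  · rcases eq_or_lt_of_le h with rfl | h'
    · simp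
    · simp [h', max_eq_right h]
  · simp [not_lt.mpr h, max_eq_left h]

-- invariant of B's scan over a ≤-sorted list
theorem scan_inv (l : List Int) (h : l.Pairwise (· ≤ ·)) :
    l.foldl scanStep (none, 0, 0, 0) =
      (l.getLast?,
       (match l.getLast? with | none => 0 | some y => (l.count y : Int)),
       supCount l, ((PySem.Set.ofList l).length : Int)) := by
  induction l using List.reverseRecOn with
  | nil => rfl
  | append_singleton l x ih =>
    have hl : l.Pairwise (· ≤ ·) := (List.pairwise_append.mp h).1
    have hlex : ∀ z ∈ l, z ≤ x := by
      intro z hz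
      exact (List.pairwise_append.mp h).2.2 z hz x (by simp)
    rw [List.foldl_append, ih hl]
    simp only [List.foldl_cons, List.foldl_nil]
    dsimp only [scanStep]
    rw [show (l ++ [x]).getLast? = some x by simp, PySem.Set.ofList_append_singleton,
        supCount_append]
    cases hlast : l.getLast? with
    | none =>
      have hnil : l = [] := List.getLast?_eq_none_iff.mp hlast
      subst hnil
      simp [supCount, PySem.Set.add, PySem.Set.ofList]
    | some y =>
      have hyl : y ∈ l := List.mem_of_getLast? hlast
      by_cases hxy : x = y
      · subst hxy
        have hc : 0 < l.count x := List.count_pos_iff.mpr hyl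
        have hcond : ((l.count x : Int) > 0 && (some x == some x)) = true := by
          simp only [beq_self_eq_true, Bool.and_true, decide_eq_true_eq]
          exact_mod_cast hc
        rw [hcond]
        simp only [if_true]
        have hadd : (PySem.Set.ofList l).add x = PySem.Set.ofList l := by
          simp [PySem.Set.add, PySem.Set.contains_eq_listContains,
            PySem.Set.mem_ofList, hyl]
        rw [hadd, ite_gt_eq_max]
        have hcnt : ((l ++ [x]).count x : Int) = (l.count x : Int) + 1 := by
          rw [count_append_singleton_int, if_pos rfl]
        rw [hcnt]
      · have hxnl : x ∉ l := by
          intro hxl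
          have h1 : x ≤ y := le_getLast?_of_pairwise hl hxl hlast
          have h2 : y ≤ x := hlex y hyl
          exact hxy (le_antisymm h1 h2)
        have hcond : ((l.count y : Int) > 0 && (some y == some x)) = false := by
          simp [Ne.symm hxy]
        rw [hcond]
        simp only [Bool.false_eq_true, if_false]
        have hc0 : (l.count x : Int) = 0 := by
          simp [List.count_eq_zero_of_not_mem hxnl]
        have hadd : (PySem.Set.ofList l).add x = PySem.Set.ofList l ++ [x] := by
          simp only [PySem.Set.add]
          rw [if_neg]
          intro hcon
          rw [PySem.Set.contains_eq_listContains, List.contains_iff_mem,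
            PySem.Set.mem_ofList] at hcon
          exact hxnl hcon
        have hcnt : ((l ++ [x]).count x : Int) = 1 := by
          rw [count_append_singleton_int, if_pos rfl, hc0]
          norm_num
        rw [hadd, ite_gt_eq_max, hcnt, hc0]
        norm_num

theorem supCount_le_of_subcount {l l' : List Int}
    (hc : ∀ y ∈ l, (l.count y : Int) ≤ (l'.count y : Int))
    (hm : ∀ y ∈ l, y ∈ l') : supCount l ≤ supCount l' := by
  apply foldl_max_le (foldl_max_init _ 0)
  intro v hv
  obtain ⟨y, hy, rfl⟩ := List.mem_map.mp hv
  have hyl : y ∈ l := (PySem.Set.mem_ofList _ _).mp hy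
  refine le_trans (hc y hyl) (foldl_max_mem 0 ?_)
  exact List.mem_map.mpr ⟨y, (PySem.Set.mem_ofList _ _).mpr (hm y hyl), rfl⟩

theorem supCount_perm {l l' : List Int} (h : l.Perm l') : supCount l = supCount l' := by
  apply le_antisymm
  · exact supCount_le_of_subcount (fun y _ => by rw [h.count_eq]) (fun y hy => h.mem_iff.mp hy)
  · exact supCount_le_of_subcount (fun y _ => by rw [h.count_eq]) (fun y hy => h.mem_iff.mpr hy)

theorem ofList_length_perm {l l' : List Int} (h : l.Perm l') :
    (PySem.Set.ofList l).length = (PySem.Set.ofList l').length := by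
  refine List.Perm.length_eq ?_
  rw [List.perm_ext_iff_of_nodup (PySem.Set.nodup_ofList _) (PySem.Set.nodup_ofList _)]
  intro y
  rw [PySem.Set.mem_ofList, PySem.Set.mem_ofList]
  exact h.mem_iff

-- ===== VERDICT (by name: the statement is the Claim_ definition above) =====
theorem teamcomp_spec : Claim_equal_teamcomp := by
  intro n a _
  unfold Spec_teamcomp teamcomp teamcomp_alt
  by_cases hn : n == 1
  · simp [hn]
  · simp only [hn]
    have hperm : (PySem.List.sorted a (fun x => x) false).Perm a :=
      PySem.List.sorted_perm a (fun x => x) false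
    rw [teamcomp_inv, scan_inv _ (PySem.List.sorted_pairwise a (fun x => x)),
        supCount_perm hperm, ofList_length_perm hperm]
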